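-- pv_equiv track=rewrite | github.com/LuukHenk/2048-Solver | lib/game_tools.py | build_fancy_board
-- ===== SOURCE A (Python) =====
-- def build_fancy_board(board):
--     """ Build a fancy terminal board of the board list"""
--     # Set the width of the board
--     board_spacing = 10
--
--     # Build tile spacing
--     tile_spacing = "".join([" " for _ in range(board_spacing)])
--     tile_spacing = "||".join([tile_spacing, tile_spacing, tile_spacing, tile_spacing])
--
--     # Build midline
--     midline = "".join(["_" for _ in range(board_spacing)])
--     midline = "00".join([midline, midline, midline, midline])
--
--     # Build the board
--     total_board = ""
--     for i, row in enumerate(board):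
--
--         # Build the tiles
--         tiles = list(map(lambda n: str(" " if n == 0 else n).center(board_spacing, " "), row))
--         line = "||".join(tiles)
--
--         if i == 0:
--             total_board = "\n".join([tile_spacing, line, tile_spacing])
--         else:
--             total_board = "\n".join([total_board, midline, tile_spacing, line, tile_spacing])
--
--     return total_board
-- ===== SOURCE B (Python) =====
-- def build_fancy_board(board):
--     """ Build a fancy terminal board of the board list"""
--     board_spacing = 10
--
--     spacing = " " * board_spacing
--     tile_spacing = "||".join([spacing, spacing, spacing, spacing])
--
--     dash = "_" * board_spacing
--     midline = "00".join([dash, dash, dash, dash])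
--
--     blocks = []
--     for row in board:
--         line = "||".join(str(" " if n == 0 else n).center(board_spacing, " ") for n in row)
--         blocks.append("\n".join([tile_spacing, line, tile_spacing]))
--
--     return ("\n" + midline + "\n").join(blocks)
-- ===== Notes on version B (the rewrite author's own statement) =====
-- stated objective: faster
-- what changed: Replaced the running string accumulator with its first-iteration i==0 branch by building a list of per-row blocks and joining them once with the '\n<midline>\n' separator, so the growing board string is never recopied per row.
import Mathlib
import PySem

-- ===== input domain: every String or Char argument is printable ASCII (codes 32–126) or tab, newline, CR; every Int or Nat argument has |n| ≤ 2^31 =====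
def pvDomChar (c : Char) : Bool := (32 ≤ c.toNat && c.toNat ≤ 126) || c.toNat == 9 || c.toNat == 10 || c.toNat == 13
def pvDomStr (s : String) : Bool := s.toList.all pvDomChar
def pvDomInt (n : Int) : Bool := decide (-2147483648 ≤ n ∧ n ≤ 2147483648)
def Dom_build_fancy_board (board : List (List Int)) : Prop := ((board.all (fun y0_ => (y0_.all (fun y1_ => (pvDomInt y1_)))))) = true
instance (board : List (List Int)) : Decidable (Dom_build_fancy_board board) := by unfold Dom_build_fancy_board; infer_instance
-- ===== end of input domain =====

-- B removes A's first-iteration branch and running accumulator: it collects per-row blocks and joins them once (objective: simpler).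

-- exact port of str.center(width, " ") for EVEN width (Python's extra-pad-goes-left bit is 0 then):
-- left margin = (width - len) / 2, remainder on the right
def pvCenter (s : String) (width : Nat) : String :=
  let cs := s.toList
  if width ≤ cs.length then s
  else
    let marg := width - cs.length
    String.mk (List.replicate (marg / 2) ' ' ++ cs ++ List.replicate (marg - marg / 2) ' ')

-- ===== PORT A =====
def build_fancy_board (board : List (List Int)) : String :=
  let board_spacing : Nat := 10
  let tile_spacing0 := PySem.Str.join "" ((PySem.List.pyRange 0 (board_spacing : Int) 1).map (fun _ => " "))
  let tile_spacing := PySem.Str.join "||" [tile_spacing0, tile_spacing0, tile_spacing0, tile_spacing0]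
  let midline0 := PySem.Str.join "" ((PySem.List.pyRange 0 (board_spacing : Int) 1).map (fun _ => "_"))
  let midline := PySem.Str.join "00" [midline0, midline0, midline0, midline0]
  (PySem.List.enumerate board 0).foldl
    (fun total_board p =>
      let tiles := p.2.map (fun n => pvCenter (if n = 0 then " " else PySem.Int.toStr n) board_spacing)
      let line := PySem.Str.join "||" tiles
      if p.1 = 0 then
        PySem.Str.join "\n" [tile_spacing, line, tile_spacing]
      else
        PySem.Str.join "\n" [total_board, midline, tile_spacing, line, tile_spacing]) ""

-- ===== PORT B =====
def build_fancy_board_alt (board : List (List Int)) : String :=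
  let board_spacing : Nat := 10
  let spacing := String.mk (List.replicate board_spacing ' ')
  let tile_spacing := PySem.Str.join "||" [spacing, spacing, spacing, spacing]
  let dash := String.mk (List.replicate board_spacing '_')
  let midline := PySem.Str.join "00" [dash, dash, dash, dash]
  let blocks := board.map (fun row =>
    let line := PySem.Str.join "||" (row.map (fun n => pvCenter (if n = 0 then " " else PySem.Int.toStr n) board_spacing))
    PySem.Str.join "\n" [tile_spacing, line, tile_spacing])
  PySem.Str.join ("\n" ++ midline ++ "\n") blocks

-- ===== PRECONDITION & SPEC =====
def Spec_build_fancy_board (board : List (List Int)) (out : String) : Prop := out = build_fancy_board_alt board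
instance (board : List (List Int)) (out : String) : Decidable (Spec_build_fancy_board board out) := by unfold Spec_build_fancy_board; infer_instance

-- ===== CLAIM (what is proved, stated in full; the proofs are below) =====
def Claim_equal_build_fancy_board : Prop := ∀ (board : List (List Int)), Dom_build_fancy_board board → Spec_build_fancy_board board (build_fancy_board board)


-- proof-side abbreviations (values of the constant strings and the per-row pieces)
def pvT : String := "          ||          ||          ||          "
def pvM : String := "__________00__________00__________00__________"
def pvSep : String := "\n" ++ pvM ++ "\n"
def pvLine (row : List Int) : String :=
  PySem.Str.join "||" (row.map (fun n => pvCenter (if n = 0 then " " else PySem.Int.toStr n) 10))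
def pvBlk (row : List Int) : String := PySem.Str.join "\n" [pvT, pvLine row, pvT]
def pvStepA (total_board : String) (p : Int × List Int) : String :=
  if p.1 = 0 then PySem.Str.join "\n" [pvT, pvLine p.2, pvT]
  else PySem.Str.join "\n" [total_board, pvM, pvT, pvLine p.2, pvT]

theorem pv_join_nil (sep : String) : PySem.Str.join sep [] = "" := by
  simp [PySem.Str.join, PySem.Chars.join_nil]

theorem pv_join_singleton (sep x : String) : PySem.Str.join sep [x] = x := by
  simp [PySem.Str.join, PySem.Chars.join_singleton]

theorem pv_join_cons_cons (sep x y : String) (xs : List String) :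
    PySem.Str.join sep (x :: y :: xs) = x ++ sep ++ PySem.Str.join sep (y :: xs) := by
  simp [PySem.Str.join, PySem.Chars.join_cons_cons]
  rw [String.append_assoc]

theorem pv_join_glue (sep a b : String) (xs : List String) :
    PySem.Str.join sep ((a ++ sep ++ b) :: xs) = PySem.Str.join sep (a :: b :: xs) := by
  cases xs with
  | nil => rw [pv_join_singleton, pv_join_cons_cons, pv_join_singleton]
  | cons z zs =>
      rw [pv_join_cons_cons, pv_join_cons_cons, pv_join_cons_cons]
      simp [String.append_assoc]

theorem pv_stepA_else (a : String) (k : Int) (row : List Int) (hk : k ≠ 0) :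
    pvStepA a (k, row) = a ++ pvSep ++ pvBlk row := by
  unfold pvStepA pvSep pvBlk
  rw [if_neg hk, pv_join_cons_cons, pv_join_cons_cons]
  simp [String.append_assoc]

theorem pv_foldA (rest : List (List Int)) (k : Int) (a : String) (hk : 0 < k) :
    (PySem.List.enumerate rest k).foldl pvStepA a
      = PySem.Str.join pvSep (a :: rest.map pvBlk) := by
  induction rest generalizing k a with
  | nil => simp [PySem.List.enumerate_nil, pv_join_singleton]
  | cons r rs ih =>
      rw [PySem.List.enumerate_cons, List.foldl_cons,
        pv_stepA_else a k r (by omega), ih (k + 1) _ (by omega), pv_join_glue]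
      rfl

theorem pv_A_eq (board : List (List Int)) :
    build_fancy_board board = (PySem.List.enumerate board 0).foldl pvStepA "" := by
  have hT : PySem.Str.join "||" [PySem.Str.join "" ((PySem.List.pyRange 0 (10 : Int) 1).map (fun _ => " ")),
      PySem.Str.join "" ((PySem.List.pyRange 0 (10 : Int) 1).map (fun _ => " ")),
      PySem.Str.join "" ((PySem.List.pyRange 0 (10 : Int) 1).map (fun _ => " ")),
      PySem.Str.join "" ((PySem.List.pyRange 0 (10 : Int) 1).map (fun _ => " "))] = pvT := by decide
  have hM : PySem.Str.join "00" [PySem.Str.join "" ((PySem.List.pyRange 0 (10 : Int) 1).map (fun _ => "_")),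
      PySem.Str.join "" ((PySem.List.pyRange 0 (10 : Int) 1).map (fun _ => "_")),
      PySem.Str.join "" ((PySem.List.pyRange 0 (10 : Int) 1).map (fun _ => "_")),
      PySem.Str.join "" ((PySem.List.pyRange 0 (10 : Int) 1).map (fun _ => "_"))] = pvM := by decide
  simp only [build_fancy_board, Nat.cast_ofNat, hT, hM]
  rfl

theorem pv_B_eq (board : List (List Int)) :
    build_fancy_board_alt board = PySem.Str.join pvSep (board.map pvBlk) := by
  have hT : PySem.Str.join "||" [String.mk (List.replicate 10 ' '), String.mk (List.replicate 10 ' '),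
      String.mk (List.replicate 10 ' '), String.mk (List.replicate 10 ' ')] = pvT := by decide
  have hM : PySem.Str.join "00" [String.mk (List.replicate 10 '_'), String.mk (List.replicate 10 '_'),
      String.mk (List.replicate 10 '_'), String.mk (List.replicate 10 '_')] = pvM := by decide
  simp only [build_fancy_board_alt, hT, hM]
  rfl

-- ===== VERDICT (by name: the statement is the Claim_ definition above) =====
theorem build_fancy_board_spec : Claim_equal_build_fancy_board := by
  intro board _
  show build_fancy_board board = build_fancy_board_alt board
  rw [pv_A_eq, pv_B_eq]
  cases board with
  | nil => simp [PySem.List.enumerate_nil, pv_join_nil]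
  | cons r rs =>
      rw [PySem.List.enumerate_cons, List.foldl_cons]
      have h0 : pvStepA "" (0, r) = pvBlk r := by simp [pvStepA, pvBlk]
      rw [h0]
      exact pv_foldA rs (0 + 1) (pvBlk r) (by omega)
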